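-- pv_equiv track=rewrite | github.com/jl0up/magstab | src/magstab/misc/dac_via_rp_old.py | code_to_tuple
-- ===== SOURCE A (Python) =====
-- def code_to_tuple(c: int, word_length=8, nb_of_words=3) -> tuple:
--     '''Converts a code (integer) to a tuple of binary words
--     '''
--     try:
--         assert isinstance(c, int)
--         assert 0 <= c < 2**(nb_of_words*word_length)
--     except:
--         raise
--     else:
--         return tuple([ ( c & (2**word_length-1 << i*word_length) ) >> i*word_length for i in range(nb_of_words)[::-1] ])
-- ===== SOURCE B (Python) =====
-- def code_to_tuple(c: int, word_length=8, nb_of_words=3) -> tuple: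
--     '''Converts a code (integer) to a tuple of binary words
--     '''
--     assert isinstance(c, int)
--     assert 0 <= c < 2**(nb_of_words*word_length)
--     base = 2**word_length
--     rest = c
--     words = []
--     for _ in range(nb_of_words):
--         rest, w = divmod(rest, base)
--         words.append(w)
--     return tuple(reversed(words))
-- ===== Notes on version B (the rewrite author's own statement) =====
-- stated objective: alternative
-- what changed: A computes each word independently by building a shifted mask and masking/shifting the full code at each bit offset over a reversed index range; B progressively peels the low word with divmod on a shrinking remainder nb_of_words times and reverses the accumulated list.
import Mathlib
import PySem

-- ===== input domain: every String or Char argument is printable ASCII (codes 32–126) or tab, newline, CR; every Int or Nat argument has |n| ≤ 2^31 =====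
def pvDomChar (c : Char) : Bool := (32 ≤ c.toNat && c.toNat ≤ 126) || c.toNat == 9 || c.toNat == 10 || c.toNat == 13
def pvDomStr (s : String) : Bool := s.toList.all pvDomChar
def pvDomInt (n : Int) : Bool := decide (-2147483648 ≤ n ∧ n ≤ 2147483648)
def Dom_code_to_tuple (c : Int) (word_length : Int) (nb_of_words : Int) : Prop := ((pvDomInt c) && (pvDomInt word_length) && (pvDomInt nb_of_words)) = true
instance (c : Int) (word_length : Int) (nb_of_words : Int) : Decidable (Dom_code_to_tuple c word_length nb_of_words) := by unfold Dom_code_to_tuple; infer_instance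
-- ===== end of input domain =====

-- B replaces A's per-index mask-and-shift over a reversed range with a progressive
-- divmod peel of the low word followed by a reverse (objective: alternative decomposition).

-- ===== PORT A =====
-- tuple([ (c & (2**word_length-1 << i*word_length)) >> i*word_length for i in range(nb_of_words)[::-1] ])
def code_to_tuple (c : Int) (word_length : Int) (nb_of_words : Int) : List Int :=
  ((PySem.List.pyRange 0 nb_of_words 1).reverse).map
    (fun i => PySem.Int.band c (((2 : Int) ^ word_length.toNat - 1) <<< (i * word_length).toNat)
                >>> (i * word_length).toNat)

-- ===== PORT B =====
-- rest = c; loop nb_of_words times: rest, w = divmod(rest, 2**word_length); append w; reverse at the end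
def code_to_tuple_alt (c : Int) (word_length : Int) (nb_of_words : Int) : List Int :=
  (((PySem.List.pyRange 0 nb_of_words 1).foldl
      (fun (st : Int × List Int) _ =>
        (PySem.Int.floordiv st.1 ((2 : Int) ^ word_length.toNat),
         st.2 ++ [PySem.Int.mod st.1 ((2 : Int) ^ word_length.toNat)])) (c, [])).2).reverse

-- ===== PRECONDITION & SPEC =====
-- Pre_ excludes exactly the inputs where the Python A raises: c < 0 or c ≥ 2**(nb*wl)
-- (assert failure; when nb*wl < 0 the Python bound is a float < 1, so only c = 0 passes),
-- and negative word_length with a positive word count (negative shift count, TypeError).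
def Pre_code_to_tuple (c : Int) (word_length : Int) (nb_of_words : Int) : Prop :=
  0 ≤ c ∧ (0 ≤ word_length ∨ nb_of_words ≤ 0) ∧
    (if 0 ≤ nb_of_words * word_length
      then (PySem.Int.bitLength c : Int) ≤ nb_of_words * word_length
      else c = 0)
instance (c : Int) (word_length : Int) (nb_of_words : Int) : Decidable (Pre_code_to_tuple c word_length nb_of_words) := by unfold Pre_code_to_tuple; infer_instance
def pvWitness_code_to_tuple : Int × Int × Int := (66051, 8, 3)

def Spec_code_to_tuple (c : Int) (word_length : Int) (nb_of_words : Int) (out : List Int) : Prop := out = code_to_tuple_alt c word_length nb_of_words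
instance (c : Int) (word_length : Int) (nb_of_words : Int) (out : List Int) : Decidable (Spec_code_to_tuple c word_length nb_of_words out) := by unfold Spec_code_to_tuple; infer_instance

-- ===== CLAIM (what is proved, stated in full; the proofs are below) =====
def Claim_equal_code_to_tuple : Prop := ∀ (c : Int) (word_length : Int) (nb_of_words : Int), Dom_code_to_tuple c word_length nb_of_words → Pre_code_to_tuple c word_length nb_of_words → Spec_code_to_tuple c word_length nb_of_words (code_to_tuple c word_length nb_of_words)

-- ===== LEMMAS AND PROOFS =====

-- A's word: (m & ((2^w-1) << s)) >> s = (m >> s) % 2^w on naturals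
theorem pv_nat_mask_shift (m w s : Nat) :
    (m &&& ((2 ^ w - 1) <<< s)) >>> s = (m >>> s) % 2 ^ w := by
  apply Nat.eq_of_testBit_eq
  intro j
  simp [Nat.testBit_shiftRight, Nat.testBit_and, Nat.testBit_shiftLeft,
        Nat.testBit_mod_two_pow, Nat.testBit_two_pow_sub_one]
  by_cases hj : j < w <;> simp [hj]

theorem pv_word_eq (m w s : Nat) :
    PySem.Int.band (↑m) (((2 : Int) ^ w - 1) <<< s) >>> s
      = ((m / 2 ^ s % 2 ^ w : Nat) : Int) := by
  have h1 : ((2 : Int) ^ w - 1) = ((2 ^ w - 1 : Nat) : Int) := by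
    have : (1 : Nat) ≤ 2 ^ w := Nat.one_le_two_pow
    push_cast [this]; ring
  rw [h1]
  have h2 : ((2 ^ w - 1 : Nat) : Int) <<< s = (((2 ^ w - 1) <<< s : Nat) : Int) := by
    simp only [Nat.shiftLeft_eq, Int.shiftLeft_eq]
    push_cast
    ring
  rw [h2, PySem.Int.band_natCast]
  have h3 : ((m &&& (2 ^ w - 1) <<< s : Nat) : Int) >>> s
      = (((m &&& (2 ^ w - 1) <<< s) >>> s : Nat) : Int) := by
    simp only [Nat.shiftRight_eq_div_pow, Int.shiftRight_eq_div_pow]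
    exact (Int.natCast_div _ _).symm
  rw [h3, pv_nat_mask_shift]
  simp [Nat.shiftRight_eq_div_pow]

-- a foldl that ignores the list elements is function iteration
theorem pv_foldl_const {α β : Type} (f : α → α) (init : α) (l : List β) :
    l.foldl (fun st _ => f st) init = f^[l.length] init := by
  induction l generalizing init with
  | nil => rfl
  | cons x xs ih => simp [List.foldl_cons, ih, Function.iterate_succ_apply]

-- B's loop state after k iterations
theorem pv_loop_state (m w : Nat) (k : Nat) :
    (fun (st : Int × List Int) =>
        (PySem.Int.floordiv st.1 ((2:Int) ^ w), st.2 ++ [PySem.Int.mod st.1 ((2:Int) ^ w)]))^[k]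
      ((↑m : Int), ([] : List Int))
    = ((↑(m / 2 ^ (k * w)) : Int),
        (List.range k).map (fun j => ((m / 2 ^ (j * w) % 2 ^ w : Nat) : Int))) := by
  induction k with
  | zero => simp
  | succ k ih =>
    rw [Function.iterate_succ_apply', ih]
    have hb : ((2:Int) ^ w) = ((2 ^ w : Nat) : Int) := by push_cast; ring
    dsimp only
    rw [hb, PySem.Int.floordiv_natCast, PySem.Int.mod_natCast, Nat.div_div_eq_div_mul,
        List.range_succ, List.map_append, ← pow_add]
    have hkw : k * w + w = (k + 1) * w := by ring
    rw [hkw]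
    simp

theorem code_to_tuple_eq (c wl nb : Int) (hc : 0 ≤ c) (hwn : 0 ≤ wl ∨ nb ≤ 0) :
    code_to_tuple c wl nb = code_to_tuple_alt c wl nb := by
  by_cases hnb : nb ≤ 0
  · simp [code_to_tuple, code_to_tuple_alt, PySem.List.pyRange_one_eq_nil hnb]
  · rw [Int.not_le] at hnb
    have hwl : 0 ≤ wl := by
      rcases hwn with h | h
      · exact h
      · omega
    obtain ⟨m, rfl⟩ := Int.eq_ofNat_of_zero_le hc
    obtain ⟨w, rfl⟩ := Int.eq_ofNat_of_zero_le hwl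
    obtain ⟨n, rfl⟩ := Int.eq_ofNat_of_zero_le (le_of_lt hnb)
    simp only [code_to_tuple, code_to_tuple_alt]
    rw [pv_foldl_const, PySem.List.length_pyRange_one]
    simp only [Int.toNat_natCast]
    have hn : ((n : Int) - 0).toNat = n := by omega
    rw [hn, pv_loop_state m w n]
    rw [PySem.List.pyRange_one]
    simp only [Int.sub_zero, Int.toNat_natCast, zero_add]
    rw [← List.map_reverse, ← List.map_reverse, List.map_map]
    apply List.map_congr_left
    intro k _
    simp only [Function.comp_apply]
    have hs : ((k : Int) * (w : Int)).toNat = k * w := by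
      rw [← Int.natCast_mul]; exact Int.toNat_natCast _
    rw [hs, pv_word_eq]

-- ===== VERDICT (by name: the statement is the Claim_ definition above) =====
theorem code_to_tuple_spec : Claim_equal_code_to_tuple := by
  intro c wl nb _ hpre
  unfold Spec_code_to_tuple
  exact code_to_tuple_eq c wl nb hpre.1 hpre.2.1
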